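-- pv_equiv track=rewrite | github.com/rubelw/OSSS | src/OSSS/ai/agents/query_data/handlers/iep_plans_handler.py | _select_iep_plans_fields
-- ===== SOURCE A (Python) =====
-- from typing import Any, Dict, List, Sequence
--
-- def _select_iep_plans_fields(
--     rows: Sequence[Dict[str, Any]],
-- ) -> List[str]:
--     if not rows:
--         return []
--
--     preferred_order = [
--         "id",
--         "iep_code",
--         "student_id",
--         "student_code",
--         "student_name",
--         "case_manager_id",
--         "case_manager_name",
--         "status",
--         "eligibility_category",
--         "start_date",
--         "end_date",
--         "next_review_date",
--         "grade_level",
--         "school",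
--         "created_at",
--         "updated_at",
--     ]
--
--     all_keys: List[str] = []
--     for r in rows:
--         for k in r.keys():
--             if k not in all_keys:
--                 all_keys.append(k)
--
--     ordered = [k for k in preferred_order if k in all_keys]
--     ordered.extend(x for x in all_keys if x not in ordered)
--     return ordered
-- ===== SOURCE B (Python) =====
-- from typing import Any, Dict, List, Sequence
--
-- def _select_iep_plans_fields(
--     rows: Sequence[Dict[str, Any]],
-- ) -> List[str]:
--     if not rows:
--         return []
--
--     preferred_order = [
--         "id",
--         "iep_code",
--         "student_id",
--         "student_code",
--         "student_name",
--         "case_manager_id",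
--         "case_manager_name",
--         "status",
--         "eligibility_category",
--         "start_date",
--         "end_date",
--         "next_review_date",
--         "grade_level",
--         "school",
--         "created_at",
--         "updated_at",
--     ]
--
--     preferred_set = set(preferred_order)
--
--     # Preferred keys that occur anywhere, in preferred order.
--     result = [k for k in preferred_order if any(k in r for r in rows)]
--
--     # Extra keys, deduplicated in first-seen order, skipping preferred ones.
--     seen = set()
--     for r in rows:
--         for k in r.keys():
--             if k not in preferred_set and k not in seen:
--                 seen.add(k)
--                 result.append(k)
--     return result
-- ===== Notes on version B (the rewrite author's own statement) =====
-- stated objective: faster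
-- what changed: Instead of building a deduplicated list of all keys with quadratic list-membership tests and then filtering it twice, B tests each of the 16 preferred keys for presence directly against the rows and makes a single set-backed dedup pass collecting only the non-preferred keys in first-seen order.
import Mathlib
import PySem

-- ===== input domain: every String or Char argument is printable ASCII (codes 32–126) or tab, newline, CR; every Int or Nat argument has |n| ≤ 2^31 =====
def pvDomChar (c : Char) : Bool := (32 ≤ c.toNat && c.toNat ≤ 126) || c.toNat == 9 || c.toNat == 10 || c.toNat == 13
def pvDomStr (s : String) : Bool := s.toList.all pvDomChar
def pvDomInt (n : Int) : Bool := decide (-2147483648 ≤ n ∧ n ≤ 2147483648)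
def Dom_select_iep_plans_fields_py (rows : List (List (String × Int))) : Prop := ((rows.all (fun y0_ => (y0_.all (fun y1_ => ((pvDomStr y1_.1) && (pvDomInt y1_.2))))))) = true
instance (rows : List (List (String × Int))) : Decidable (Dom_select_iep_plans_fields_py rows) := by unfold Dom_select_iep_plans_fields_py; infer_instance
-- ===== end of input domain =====

-- B replaces A's build-full-dedup-list-then-filter-it-twice with a direct per-preferred-key presence
-- test plus a single dedup pass restricted to the non-preferred keys (objective: alternative).

-- shared module constant: the preferred_order list of the Python module
def pvPreferredOrder : List String :=
  ["id", "iep_code", "student_id", "student_code", "student_name", "case_manager_id",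
   "case_manager_name", "status", "eligibility_category", "start_date", "end_date",
   "next_review_date", "grade_level", "school", "created_at", "updated_at"]

-- ===== PORT A =====
def select_iep_plans_fields_py (rows : List (List (String × Int))) : List String :=
  if rows = [] then []
  else
    -- all_keys: every key, deduplicated, in first-seen order
    let all_keys := rows.foldl
      (fun acc r => r.foldl
        (fun acc p => if acc.contains p.1 then acc else acc ++ [p.1]) acc)
      ([] : List String)
    -- ordered = [k for k in preferred_order if k in all_keys]
    let ordered := pvPreferredOrder.filter (fun k => all_keys.contains k)
    -- ordered.extend(x for x in all_keys if x not in ordered)  (lazy generator: checks the growing list)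
    all_keys.foldl (fun acc x => if acc.contains x then acc else acc ++ [x]) ordered

-- ===== PORT B =====
def select_iep_plans_fields_py_alt (rows : List (List (String × Int))) : List String :=
  if rows = [] then []
  else
    let preferredSet : PySem.Set String := PySem.Set.ofList pvPreferredOrder
    -- result = [k for k in preferred_order if any(k in r for r in rows)]
    let result := pvPreferredOrder.filter (fun k => rows.any (fun r => r.any (fun p => p.1 == k)))
    -- for r in rows: for k in r.keys(): if k not in preferred_set and k not in seen: seen.add(k); result.append(k)
    let st := rows.foldl
      (fun (st : PySem.Set String × List String) r => r.foldl
        (fun st p =>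
          if !(PySem.Set.contains preferredSet p.1) && !(PySem.Set.contains st.1 p.1)
          then (PySem.Set.add st.1 p.1, st.2 ++ [p.1])
          else st)
        st)
      ((PySem.Set.empty : PySem.Set String), result)
    st.2

-- ===== PRECONDITION & SPEC =====
def Spec_select_iep_plans_fields_py (rows : List (List (String × Int))) (out : List String) : Prop := out = select_iep_plans_fields_py_alt rows
instance (rows : List (List (String × Int))) (out : List String) : Decidable (Spec_select_iep_plans_fields_py rows out) := by unfold Spec_select_iep_plans_fields_py; infer_instance

-- ===== CLAIM (what is proved, stated in full; the proofs are below) =====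
def Claim_equal_select_iep_plans_fields_py : Prop := ∀ (rows : List (List (String × Int))), Dom_select_iep_plans_fields_py rows → Spec_select_iep_plans_fields_py rows (select_iep_plans_fields_py rows)

-- ===== LEMMAS AND PROOFS =====

-- the flat key sequence both programs traverse row by row
def pvKeys (rows : List (List (String × Int))) : List String := rows.flatten.map Prod.fst

-- A's nested dedup loop is a fold of Set.add over the flat key list
lemma foldlA_eq_foldl_add (rows : List (List (String × Int))) (init : List String) :
    rows.foldl
      (fun acc r => r.foldl
        (fun acc p => if acc.contains p.1 then acc else acc ++ [p.1]) acc)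
      init
    = (pvKeys rows).foldl PySem.Set.add init := by
  induction rows generalizing init with
  | nil => rfl
  | cons r t ih =>
    rw [List.foldl_cons, ih]
    have hk : pvKeys (r :: t) = r.map Prod.fst ++ pvKeys t := by simp [pvKeys]
    rw [hk, List.foldl_append, List.foldl_map]
    congr 1

-- Set.ofList commutes with filter
lemma ofList_filter (q : String → Bool) (l : List String) :
    PySem.Set.ofList (l.filter q) = (PySem.Set.ofList l).filter q := by
  induction l with
  | nil => rfl
  | cons x t ih =>
    rw [PySem.Set.ofList_cons]
    by_cases h : q x = true
    · rw [List.filter_cons_of_pos h, PySem.Set.ofList_cons, ih,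
        List.filter_cons_of_pos h]
      simp only [PySem.Set.discard, List.filter_filter]
      congr 1
      apply List.filter_congr
      intro y _
      exact Bool.and_comm _ _
    · rw [List.filter_cons_of_neg h, List.filter_cons_of_neg h, ih]
      simp only [PySem.Set.discard, List.filter_filter]
      apply List.filter_congr
      intro y _
      by_cases hy : y = x
      · subst hy; simp only [Bool.not_eq_true] at h; simp [h]
      · simp [hy]

-- B's guarded dedup loop over a flat key list: the appended segment is the dedup of the admitted keys
lemma foldlB_eq (p : String → Bool) (l : List String) (s : PySem.Set String) (res : List String) :
    (l.foldl
      (fun (st : PySem.Set String × List String) k =>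
        if p k && !(PySem.Set.contains st.1 k)
        then (PySem.Set.add st.1 k, st.2 ++ [k])
        else st)
      (s, res)).2
    = res ++ PySem.Set.ofList (l.filter (fun k => p k && !(PySem.Set.contains s k))) := by
  induction l generalizing s res with
  | nil => simp
  | cons k t ih =>
    by_cases hp : p k = true
    · by_cases hs : PySem.Set.contains s k = true
      · rw [List.foldl_cons, if_neg (by simpa [hp] using hs), ih,
          List.filter_cons_of_neg (by simpa [hp] using hs)]
      · have hmem : k ∉ s := by simpa using hs
        rw [List.foldl_cons, if_pos (by simpa [hp] using hs), ih,
          List.filter_cons_of_pos (by simpa [hp] using hs),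
          PySem.Set.ofList_cons, PySem.Set.add_of_not_mem hmem]
        have hfilt : t.filter (fun k' => p k' && !(PySem.Set.contains (s ++ [k]) k'))
            = (t.filter (fun k' => p k' && !(PySem.Set.contains s k'))).filter (fun k' => !(k' == k)) := by
          rw [List.filter_filter]
          apply List.filter_congr
          intro y _
          simp only [PySem.Set.contains, List.contains_append, List.contains_cons,
            List.elem_nil, Bool.or_false]
          by_cases hy : y = k
          · subst hy; simp
          · have h2 : (y == k) = false := by simp [hy]
            simp [h2]
        rw [hfilt, ofList_filter]
        simp [PySem.Set.discard]
    · rw [List.foldl_cons, if_neg (by simp [hp]), ih,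
        List.filter_cons_of_neg (by simp [hp])]

-- membership in the deduped key list is B's nested any-test
lemma contains_ofList_keys (rows : List (List (String × Int))) (k : String) :
    (PySem.Set.ofList (pvKeys rows)).contains k
      = rows.any (fun r => r.any (fun p => p.1 == k)) := by
  rw [Bool.eq_iff_iff]
  simp only [PySem.Set.contains_iff, PySem.Set.mem_ofList, pvKeys, List.mem_map,
    List.mem_flatten, List.any_eq_true, beq_iff_eq]
  constructor
  · rintro ⟨p, ⟨r, hr, hp⟩, hk⟩
    exact ⟨r, hr, p, hp, hk⟩
  · rintro ⟨r, hr, p, hp, hk⟩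
    exact ⟨p, ⟨r, hr, hp⟩, hk⟩

-- B's nested loop flattened to the key list
lemma foldlB_rows (rows : List (List (String × Int))) (pS : PySem.Set String)
    (init : PySem.Set String × List String) :
    rows.foldl
      (fun (st : PySem.Set String × List String) r => r.foldl
        (fun st p =>
          if !(PySem.Set.contains pS p.1) && !(PySem.Set.contains st.1 p.1)
          then (PySem.Set.add st.1 p.1, st.2 ++ [p.1])
          else st)
        st)
      init
    = (pvKeys rows).foldl
      (fun (st : PySem.Set String × List String) k =>
        if !(PySem.Set.contains pS k) && !(PySem.Set.contains st.1 k)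
        then (PySem.Set.add st.1 k, st.2 ++ [k])
        else st)
      init := by
  induction rows generalizing init with
  | nil => rfl
  | cons r t ih =>
    rw [List.foldl_cons, ih]
    have hk : pvKeys (r :: t) = r.map Prod.fst ++ pvKeys t := by simp [pvKeys]
    rw [hk, List.foldl_append, List.foldl_map]

theorem select_iep_plans_fields_py_spec_aux (rows : List (List (String × Int))) :
    select_iep_plans_fields_py rows = select_iep_plans_fields_py_alt rows := by
  by_cases hrows : rows = []
  · simp [select_iep_plans_fields_py, select_iep_plans_fields_py_alt, hrows]
  · simp only [select_iep_plans_fields_py, select_iep_plans_fields_py_alt, if_neg hrows]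
    rw [foldlA_eq_foldl_add, ← PySem.Set.ofList_eq_foldl, foldlB_rows, foldlB_eq]
    have hupd : ∀ (o l : List String),
        l.foldl (fun acc x => if acc.contains x then acc else acc ++ [x]) o
          = PySem.Set.update o l := fun _ _ => rfl
    rw [hupd, PySem.Set.update_eq_append_filter, PySem.Set.ofList_ofList]
    have hhead : pvPreferredOrder.filter (fun k => List.contains (PySem.Set.ofList (pvKeys rows)) k)
        = pvPreferredOrder.filter (fun k => rows.any (fun r => r.any (fun p => p.1 == k))) := by
      apply List.filter_congr
      intro k _
      exact contains_ofList_keys rows k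
    rw [hhead]
    congr 1
    have htail : (pvKeys rows).filter
          (fun k => !((PySem.Set.ofList pvPreferredOrder).contains k)
            && !((PySem.Set.empty : PySem.Set String).contains k))
        = (pvKeys rows).filter (fun k => !((PySem.Set.ofList pvPreferredOrder).contains k)) := by
      apply List.filter_congr
      intro k _
      simp [PySem.Set.empty]
    rw [htail, ofList_filter, ← hhead]
    apply List.filter_congr
    intro y hy
    have hyL : y ∈ pvKeys rows := (PySem.Set.mem_ofList _ _).mp hy
    congr 1
    rw [Bool.eq_iff_iff]
    simp [List.mem_filter, PySem.Set.mem_ofList, hyL]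

-- ===== VERDICT (by name: the statement is the Claim_ definition above) =====
theorem select_iep_plans_fields_py_spec : Claim_equal_select_iep_plans_fields_py := by
  intro rows _
  exact select_iep_plans_fields_py_spec_aux rows
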